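-- pv_equiv track=rewrite | github.com/Issyl-m/MinimalResolution | minr.py | adem_relation
-- ===== SOURCE A (Python) =====
-- def factorial(n):
--     r = 1
--     if n > 1:
--         for i in range(2, n + 1):
--             r = r*i
--     else:
--         r = 1
--     return r
--
-- def bin_coeff(n, k):
--     return factorial(n) // (factorial(k)*factorial(n-k))
--
-- def is_admissible(list_monomial_power):
--     r = True
--
--     len_list_monomial_power = len(list_monomial_power)
--
--     for i in range(0, len_list_monomial_power):
--         if i + 1 < len_list_monomial_power:
--             r = r and (list_monomial_power[i] >= 2*list_monomial_power[i + 1])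
--         else:
--             break ## TODO: rewrite
--
--     return r
--
-- def cancel_mod_2(list_list_linear_combination):
--     list_clean_linear_combination = []
--
--     for i in range(0, len(list_list_linear_combination)):
--         repeated_occurences = 0
--         for j in range(0, len(list_list_linear_combination)):
--                 if list_list_linear_combination[i] == list_list_linear_combination[j]:
--                     repeated_occurences += 1
--
--         if repeated_occurences % 2 == 1:
--             if not list_list_linear_combination[i] in list_clean_linear_combination:
--                 list_clean_linear_combination.append(list_list_linear_combination[i])
--
--     return list_clean_linear_combination
--
-- def adem_relation(list_monomial_power):
--     list_list_monomial_power = []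
--
--     if is_admissible(list_monomial_power):
--         list_list_monomial_power.append(list_monomial_power)
--     else:
--         a = list_monomial_power[0]
--         b = list_monomial_power[1]
--         for i in range(max(a - b + 1, 0), (a >> 1) + 1):
--             c = bin_coeff(b - i - 1, a - 2*i)
--             if not (c & 0X00000001):
--                 continue
--             else:
--                 if i == 0:
--                     list_list_monomial_power.append([a + b - i])
--                 else:
--                     list_list_monomial_power.append([a + b - i, i])
--
--     return cancel_mod_2(list_list_monomial_power)
-- ===== SOURCE B (Python) =====
-- def adem_relation(list_monomial_power):
--     lst = list_monomial_power
--     if all(lst[i] >= 2 * lst[i + 1] for i in range(len(lst) - 1)):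
--         terms = [lst]
--     else:
--         a, b = lst[0], lst[1]
--         terms = []
--         for i in range(max(a - b + 1, 0), (a >> 1) + 1):
--             # C(b-i-1, a-2i) is odd iff the bit sets of a-2i and b+i-a-1 are
--             # disjoint (Lucas's theorem mod 2); no factorials needed.
--             if ((a - 2 * i) & (b + i - a - 1)) == 0:
--                 terms.append([a + b - i] if i == 0 else [a + b - i, i])
--     # mod-2 cancellation with a counting dict instead of a quadratic rescan
--     counts = {}
--     for t in terms:
--         key = tuple(t)
--         counts[key] = counts.get(key, 0) + 1
--     out = []
--     for t in terms:
--         if counts[tuple(t)] % 2 == 1 and t not in out: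
--             out.append(t)
--     return out
-- ===== Notes on version B (the rewrite author's own statement) =====
-- stated objective: faster
-- what changed: Replaces the factorial-based binomial parity test with Lucas's-theorem bitwise disjointness ((a-2i) & (b+i-a-1)) == 0, the break-loop admissibility check with all(), and the quadratic rescan in cancel_mod_2 with a counting dict built in one pass.
import Mathlib
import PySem

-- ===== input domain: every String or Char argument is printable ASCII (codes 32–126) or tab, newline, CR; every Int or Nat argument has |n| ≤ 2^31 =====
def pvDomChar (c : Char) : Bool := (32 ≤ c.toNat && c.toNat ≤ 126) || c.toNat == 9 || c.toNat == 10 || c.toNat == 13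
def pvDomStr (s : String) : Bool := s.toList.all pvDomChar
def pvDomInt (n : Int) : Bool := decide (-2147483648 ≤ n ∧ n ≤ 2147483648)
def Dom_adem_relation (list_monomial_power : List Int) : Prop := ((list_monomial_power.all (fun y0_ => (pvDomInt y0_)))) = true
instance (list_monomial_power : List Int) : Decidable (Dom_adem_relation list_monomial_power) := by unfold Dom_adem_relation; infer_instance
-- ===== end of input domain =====

-- B replaces A's factorial-based mod-2 binomial test by Lucas's bitwise test, A's break-loop
-- admissibility check by an `all` over adjacent pairs, and A's quadratic cancel_mod_2 rescan by a
-- one-pass counting dict (objective: faster).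

-- ===== PORT A =====
def pvFactorialA (n : Int) : Int :=
  if n > 1 then (PySem.List.pyRange 2 (n + 1) 1).foldl (fun r i => r * i) 1
  else 1

def pvBinCoeffA (n k : Int) : Int :=
  PySem.Int.floordiv (pvFactorialA n) (pvFactorialA k * pvFactorialA (n - k))

-- the `for i in range(0, len)` loop of is_admissible, with its break
def pvAdmisLoopA (l : List Int) (len : Int) : List Int → Bool → Bool
  | [], r => r
  | i :: rest, r =>
    if i + 1 < len then
      pvAdmisLoopA l len rest (r && decide (PySem.List.pyGetD l i 0 ≥ 2 * PySem.List.pyGetD l (i + 1) 0))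
    else r

def pvIsAdmissibleA (l : List Int) : Bool :=
  pvAdmisLoopA l (PySem.List.len l) (PySem.List.pyRange 0 (PySem.List.len l) 1) true

def pvCancelMod2A (xs : List (List Int)) : List (List Int) :=
  (PySem.List.pyRange 0 (PySem.List.len xs) 1).foldl (fun clean i =>
    let x := PySem.List.pyGetD xs i []
    let rep : Int := (PySem.List.pyRange 0 (PySem.List.len xs) 1).foldl (fun n j =>
      if x == PySem.List.pyGetD xs j [] then n + 1 else n) 0
    if PySem.Int.mod rep 2 == 1 then
      if !(clean.contains x) then clean ++ [x] else clean
    else clean) []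

def adem_relation (list_monomial_power : List Int) : List (List Int) :=
  let lll : List (List Int) :=
    if pvIsAdmissibleA list_monomial_power then [list_monomial_power]
    else
      let a := PySem.List.pyGetD list_monomial_power 0 0
      let b := PySem.List.pyGetD list_monomial_power 1 0
      (PySem.List.pyRange (max (a - b + 1) 0) ((a >>> (1 : Nat)) + 1) 1).foldl (fun acc i =>
        let c := pvBinCoeffA (b - i - 1) (a - 2 * i)
        if PySem.Int.band c 1 == 0 then acc
        else if i == 0 then acc ++ [[a + b - i]] else acc ++ [[a + b - i, i]]) []
  pvCancelMod2A lll

-- ===== PORT B =====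
def pvTermsB (l : List Int) : List (List Int) :=
  if (PySem.List.pyRange 0 (PySem.List.len l - 1) 1).all
      (fun i => decide (PySem.List.pyGetD l i 0 ≥ 2 * PySem.List.pyGetD l (i + 1) 0))
  then [l]
  else
    let a := PySem.List.pyGetD l 0 0
    let b := PySem.List.pyGetD l 1 0
    (PySem.List.pyRange (max (a - b + 1) 0) ((a >>> (1 : Nat)) + 1) 1).foldl (fun acc i =>
      if PySem.Int.band (a - 2 * i) (b + i - a - 1) == 0 then
        acc ++ [if i == 0 then [a + b - i] else [a + b - i, i]]
      else acc) []

def adem_relation_alt (list_monomial_power : List Int) : List (List Int) :=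
  let terms := pvTermsB list_monomial_power
  let counts : PySem.Dict (List Int) Int :=
    terms.foldl (fun d t => d.insert t (d.getD t 0 + 1)) PySem.Dict.empty
  terms.foldl (fun out t =>
    if (PySem.Int.mod ((counts.get? t).getD 0) 2 == 1) && !(out.contains t) then out ++ [t]
    else out) []

-- ===== PRECONDITION & SPEC =====
def Spec_adem_relation (list_monomial_power : List Int) (out : List (List Int)) : Prop := out = adem_relation_alt list_monomial_power
instance (list_monomial_power : List Int) (out : List (List Int)) : Decidable (Spec_adem_relation list_monomial_power out) := by unfold Spec_adem_relation; infer_instance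

-- ===== CLAIM (what is proved, stated in full; the proofs are below) =====
def Claim_equal_adem_relation : Prop := ∀ (list_monomial_power : List Int), Dom_adem_relation list_monomial_power → Spec_adem_relation list_monomial_power (adem_relation list_monomial_power)

-- ===== LEMMAS AND PROOFS =====

-- factorial
theorem pvFactorialA_loop (m : Nat) :
    (PySem.List.pyRange 2 ((m : Int) + 2) 1).foldl (fun r i => r * i) 1 = (Nat.factorial (m + 1) : Int) := by
  induction m with
  | zero =>
    rw [show ((0 : Nat) : Int) + 2 = 2 by norm_num, @PySem.List.pyRange_one_eq_nil 2 2 (by omega)]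
    simp [Nat.factorial]
  | succ m ih =>
    have hsplit : PySem.List.pyRange 2 (((m + 1 : Nat) : Int) + 2) 1
        = PySem.List.pyRange 2 ((m : Int) + 2) 1 ++ [(m : Int) + 2] := by
      have := PySem.List.pyRange_one_succ_right (show (2:Int) ≤ (m : Int) + 2 by omega)
      have harg : (((m + 1 : Nat) : Int) + 2) = ((m : Int) + 2) + 1 := by push_cast; ring
      rw [harg, this]
    rw [hsplit, List.foldl_append, ih]
    show (Nat.factorial (m + 1) : Int) * ((m : Int) + 2) = (Nat.factorial (m + 2) : Int)
    rw [show Nat.factorial (m + 2) = Nat.factorial (m + 1) * (m + 2) from by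
      rw [Nat.factorial_succ (m + 1)]; ring]
    push_cast; ring

theorem pvFactorialA_natCast (m : Nat) : pvFactorialA (m : Int) = (Nat.factorial m : Int) := by
  unfold pvFactorialA
  by_cases h : (m : Int) > 1
  · rw [if_pos h]
    have hm : 2 ≤ m := by omega
    have harg : (m : Int) + 1 = ((m - 2 : Nat) : Int) + 2 + 1 := by omega
    have hfold := pvFactorialA_loop (m - 2 + 1)
    have harg2 : (((m - 2 + 1 : Nat) : Int) + 2) = (m : Int) + 1 := by push_cast; omega
    rw [harg2, show m - 2 + 1 + 1 = m from by omega] at hfold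
    rw [hfold]
  · rw [if_neg h]
    have : m = 0 ∨ m = 1 := by omega
    rcases this with h0 | h0 <;> subst h0 <;> simp [Nat.factorial]

theorem pvBinCoeffA_choose (n k : Nat) (h : k ≤ n) :
    pvBinCoeffA (n : Int) (k : Int) = (Nat.choose n k : Int) := by
  unfold pvBinCoeffA
  have hnk : (n : Int) - (k : Int) = ((n - k : Nat) : Int) := by omega
  rw [hnk, pvFactorialA_natCast, pvFactorialA_natCast, pvFactorialA_natCast]
  rw [show ((Nat.factorial k : Int) * (Nat.factorial (n - k) : Int))
        = ((Nat.factorial k * Nat.factorial (n - k) : Nat) : Int) by push_cast; ring]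
  rw [PySem.Int.floordiv_natCast]
  rw [Nat.choose_eq_factorial_div_factorial h]

-- Lucas mod 2 machinery
theorem land_eq_zero_iff_testBit (a b : Nat) :
    a &&& b = 0 ↔ ∀ i, ¬(a.testBit i = true ∧ b.testBit i = true) := by
  constructor
  · intro h i hi
    have := congrArg (fun x => x.testBit i) h
    simp [Nat.testBit_and, hi.1, hi.2] at this
  · intro h
    apply Nat.eq_of_testBit_eq
    intro i
    simp only [Nat.testBit_and, Nat.zero_testBit]
    by_cases ha : a.testBit i
    · by_cases hb : b.testBit i
      · exact absurd ⟨ha, hb⟩ (h i)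
      · simp [hb]
    · simp [ha]

theorem land_split (a b : Nat) :
    a &&& b = 0 ↔ (¬(a % 2 = 1 ∧ b % 2 = 1) ∧ (a / 2) &&& (b / 2) = 0) := by
  rw [land_eq_zero_iff_testBit, land_eq_zero_iff_testBit]
  constructor
  · intro h
    refine ⟨?_, fun i hi => h (i + 1)
      ⟨by simpa [Nat.testBit_add_one] using hi.1, by simpa [Nat.testBit_add_one] using hi.2⟩⟩
    intro hab
    exact h 0 (by simp [Nat.testBit_zero, hab.1, hab.2])
  · rintro ⟨h0, hs⟩ i hi
    cases i with
    | zero =>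
      exact h0 ⟨by simpa [Nat.testBit_zero] using hi.1,
                by simpa [Nat.testBit_zero] using hi.2⟩
    | succ i =>
      exact hs i ⟨by simpa [Nat.testBit_add_one] using hi.1,
                  by simpa [Nat.testBit_add_one] using hi.2⟩

theorem lucas_add : ∀ (s a b : Nat), a + b = s →
    (Nat.choose (a + b) a % 2 = 1 ↔ a &&& b = 0) := by
  intro s
  induction s using Nat.strong_induction_on with
  | _ s ih =>
    intro a b hs
    rcases Nat.eq_zero_or_pos s with h0 | hpos
    · have ha : a = 0 := by omega
      have hb : b = 0 := by omega
      subst ha; subst hb; decide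
    · haveI : Fact (Nat.Prime 2) := ⟨Nat.prime_two⟩
      have heq : Nat.choose (a + b) a % 2
          = (Nat.choose ((a + b) % 2) (a % 2) * Nat.choose ((a + b) / 2) (a / 2)) % 2 :=
        Choose.choose_modEq_choose_mod_mul_choose_div_nat (p := 2) (n := a + b) (k := a)
      rw [land_split a b]
      rcases Nat.mod_two_eq_zero_or_one a with hA | hA <;>
        rcases Nat.mod_two_eq_zero_or_one b with hB | hB
      · have hih := ih (a / 2 + b / 2) (by omega) (a / 2) (b / 2) rfl
        have habm : (a + b) % 2 = 0 := by omega
        have hd : (a + b) / 2 = a / 2 + b / 2 := by omega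
        rw [heq, habm, hA, hd]
        simp only [Nat.choose_self, one_mul]
        rw [hih]
        simp
      · have hih := ih (a / 2 + b / 2) (by omega) (a / 2) (b / 2) rfl
        have habm : (a + b) % 2 = 1 := by omega
        have hd : (a + b) / 2 = a / 2 + b / 2 := by omega
        rw [heq, habm, hA, hd]
        simp only [Nat.choose_zero_right, one_mul]
        rw [hih]
        simp
      · have hih := ih (a / 2 + b / 2) (by omega) (a / 2) (b / 2) rfl
        have habm : (a + b) % 2 = 1 := by omega
        have hd : (a + b) / 2 = a / 2 + b / 2 := by omega
        rw [heq, habm, hA, hd]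
        simp only [Nat.choose_self, one_mul]
        rw [hih]
        simp [hB]
      · have habm : (a + b) % 2 = 0 := by omega
        rw [heq, habm, hA]
        simp [hB, Nat.choose]

-- admissibility: A's break-loop equals B's all over adjacent pairs
theorem admisLoop_spec (l : List Int) (len : Int) (is : List Int) (r : Bool)
    (h : ∀ i ∈ is, i + 1 < len) :
    pvAdmisLoopA l len (is ++ [len - 1]) r
      = (r && is.all (fun i => decide (PySem.List.pyGetD l i 0 ≥ 2 * PySem.List.pyGetD l (i + 1) 0))) := by
  induction is generalizing r with
  | nil =>
    simp only [List.nil_append, pvAdmisLoopA, List.all_nil, Bool.and_true]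
    rw [if_neg (by omega)]
  | cons i rest ih =>
    simp only [List.cons_append, pvAdmisLoopA]
    rw [if_pos (h i (List.mem_cons_self ..))]
    rw [ih _ (fun j hj => h j (List.mem_cons_of_mem _ hj))]
    simp [Bool.and_assoc]

theorem isAdmissibleA_eq (l : List Int) :
    pvIsAdmissibleA l
      = (PySem.List.pyRange 0 (PySem.List.len l - 1) 1).all
          (fun i => decide (PySem.List.pyGetD l i 0 ≥ 2 * PySem.List.pyGetD l (i + 1) 0)) := by
  unfold pvIsAdmissibleA
  simp only [PySem.List.len_eq]
  rcases Nat.eq_zero_or_pos l.length with h0 | hpos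
  · rw [h0]
    rw [PySem.List.pyRange_one_eq_nil (by omega : ((0:Nat):Int) ≤ 0)]
    rw [PySem.List.pyRange_one_eq_nil (by omega : ((0:Nat):Int) - 1 ≤ 0)]
    simp [pvAdmisLoopA]
  · have hsplit : PySem.List.pyRange 0 ((l.length : Int)) 1
        = PySem.List.pyRange 0 ((l.length : Int) - 1) 1 ++ [(l.length : Int) - 1] := by
      have := PySem.List.pyRange_one_succ_right
        (show (0:Int) ≤ (l.length : Int) - 1 by omega)
      rw [show ((l.length : Int) - 1) + 1 = (l.length : Int) from by ring] at this
      exact this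
    rw [hsplit]
    exact admisLoop_spec l _ _ true (fun i hi => by
      rw [PySem.List.mem_pyRange_one] at hi; omega)

-- parity of the binomial coefficient: A's factorial test vs B's Lucas bit test
theorem cond_bridge (a b i : Int) (h1 : max (a - b + 1) 0 ≤ i) (h2 : i < (a >>> (1:Nat)) + 1) :
    (PySem.Int.band (pvBinCoeffA (b - i - 1) (a - 2 * i)) 1 == 0)
      = !(PySem.Int.band (a - 2 * i) (b + i - a - 1) == 0) := by
  have hsh : a >>> (1:Nat) = a / 2 := by rw [Int.shiftRight_eq_div_pow]; norm_num
  rw [hsh] at h2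
  have hk : 0 ≤ a - 2 * i := by omega
  have hm : 0 ≤ b + i - a - 1 := by omega
  obtain ⟨k, hk'⟩ : ∃ k : Nat, a - 2 * i = (k : Int) :=
    ⟨(a - 2 * i).toNat, (Int.toNat_of_nonneg hk).symm⟩
  obtain ⟨m, hm'⟩ : ∃ m : Nat, b + i - a - 1 = (m : Int) :=
    ⟨(b + i - a - 1).toNat, (Int.toNat_of_nonneg hm).symm⟩
  have hn : b - i - 1 = ((k + m : Nat) : Int) := by push_cast; omega
  rw [hn, hk', hm', pvBinCoeffA_choose (k + m) k (Nat.le_add_right k m)]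
  have hlucas := lucas_add (k + m) k m rfl
  have hband1 : PySem.Int.band ((Nat.choose (k + m) k : Nat) : Int) 1
      = ((Nat.choose (k + m) k % 2 : Nat) : Int) := by
    rw [show (1:Int) = ((1:Nat):Int) from rfl, PySem.Int.band_natCast, Nat.and_one_is_mod]
  rw [hband1, PySem.Int.band_natCast]
  by_cases hc : k &&& m = 0
  · have h1' : Nat.choose (k + m) k % 2 = 1 := hlucas.mpr hc
    simp [h1', hc]
  · have h0' : Nat.choose (k + m) k % 2 = 0 := by
      rcases Nat.mod_two_eq_zero_or_one (Nat.choose (k + m) k) with h | h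
      · exact h
      · exact absurd (hlucas.mp h) hc
    simp [h0', hc]

-- cancel_mod_2: A's quadratic rescan equals B's counter-dict pass
theorem rep_count (xs : List (List Int)) (x : List Int) :
    (PySem.List.pyRange 0 (PySem.List.len xs) 1).foldl
      (fun n j => if x == PySem.List.pyGetD xs j [] then n + 1 else n) (0:Int)
      = (List.count x xs : Int) := by
  rw [PySem.List.foldl_pyRange_zero_pyGetD xs [] (fun n y => if x == y then n + 1 else n) 0]
  rw [PySem.List.foldl_congr_mem xs _ (fun n y => if y == x then n + 1 else n) 0
    (by
      intro acc y _
      by_cases h : x = y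
      · simp [h]
      · have h' : ¬ y = x := fun e => h e.symm
        simp [h, h'])]
  rw [PySem.List.foldl_beq_add_one]
  ring

theorem cancel_eq (xs : List (List Int)) :
    pvCancelMod2A xs
      = xs.foldl (fun out t =>
          if (PySem.Int.mod
                (((xs.foldl (fun d t => d.insert t (d.getD t 0 + 1)) PySem.Dict.empty).get? t).getD 0)
                2 == 1) && !(out.contains t) then out ++ [t] else out) [] := by
  unfold pvCancelMod2A
  calc
    (PySem.List.pyRange 0 (PySem.List.len xs) 1).foldl (fun clean i =>
        let x := PySem.List.pyGetD xs i []
        let rep : Int := (PySem.List.pyRange 0 (PySem.List.len xs) 1).foldl (fun n j =>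
          if x == PySem.List.pyGetD xs j [] then n + 1 else n) 0
        if PySem.Int.mod rep 2 == 1 then
          if !(clean.contains x) then clean ++ [x] else clean
        else clean) []
      = (PySem.List.pyRange 0 (PySem.List.len xs) 1).foldl (fun clean i =>
          if PySem.Int.mod ((List.count (PySem.List.pyGetD xs i []) xs : Nat) : Int) 2 == 1 then
            if !(clean.contains (PySem.List.pyGetD xs i [])) then
              clean ++ [PySem.List.pyGetD xs i []]
            else clean
          else clean) [] := by
        apply PySem.List.foldl_congr_mem
        intro acc i _
        simp only [rep_count]
    _ = xs.foldl (fun clean x =>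
          if PySem.Int.mod ((List.count x xs : Nat) : Int) 2 == 1 then
            if !(clean.contains x) then clean ++ [x] else clean
          else clean) [] := by
        exact PySem.List.foldl_pyRange_zero_pyGetD xs []
          (fun clean x =>
            if PySem.Int.mod ((List.count x xs : Nat) : Int) 2 == 1 then
              if !(clean.contains x) then clean ++ [x] else clean
            else clean) []
    _ = xs.foldl (fun out t =>
          if (PySem.Int.mod ((List.count t xs : Nat) : Int) 2 == 1) && !(out.contains t) then
            out ++ [t]
          else out) [] := by
        apply PySem.List.foldl_congr_mem
        intro acc x _
        cases hc : (PySem.Int.mod ((List.count x xs : Nat) : Int) 2 == 1) <;>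
          cases hm : acc.contains x <;> simp [*]
    _ = xs.foldl (fun out t =>
          if (PySem.Int.mod
                (((xs.foldl (fun d t => d.insert t (d.getD t 0 + 1)) PySem.Dict.empty).get? t).getD 0)
                2 == 1) && !(out.contains t) then out ++ [t] else out) [] := by
        rw [PySem.Dict.foldl_insert_getD_add_one_eq_counter xs]
        apply PySem.List.foldl_congr_mem
        intro acc t _
        rw [← PySem.Dict.getD_eq_get?_getD, PySem.Dict.getD_counter]

-- the term lists produced by the two programs are equal
theorem terms_eq (l : List Int) :
    (if pvIsAdmissibleA l then [l]
     else
       (PySem.List.pyRange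
          (max (PySem.List.pyGetD l 0 0 - PySem.List.pyGetD l 1 0 + 1) 0)
          ((PySem.List.pyGetD l 0 0 >>> (1 : Nat)) + 1) 1).foldl (fun acc i =>
         let c := pvBinCoeffA (PySem.List.pyGetD l 1 0 - i - 1) (PySem.List.pyGetD l 0 0 - 2 * i)
         if PySem.Int.band c 1 == 0 then acc
         else if i == 0 then acc ++ [[PySem.List.pyGetD l 0 0 + PySem.List.pyGetD l 1 0 - i]]
         else acc ++ [[PySem.List.pyGetD l 0 0 + PySem.List.pyGetD l 1 0 - i, i]]) [])
      = pvTermsB l := by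
  unfold pvTermsB
  rw [isAdmissibleA_eq]
  set a := PySem.List.pyGetD l 0 0 with ha
  set b := PySem.List.pyGetD l 1 0 with hb
  by_cases hadm : ((PySem.List.pyRange 0 (PySem.List.len l - 1) 1).all
      (fun i => decide (PySem.List.pyGetD l i 0 ≥ 2 * PySem.List.pyGetD l (i + 1) 0))) = true
  · rw [if_pos hadm, if_pos hadm]
  · rw [if_neg hadm, if_neg hadm]
    apply PySem.List.foldl_congr_mem
    intro acc i hi
    rw [PySem.List.mem_pyRange_one] at hi
    have hbridge := cond_bridge a b i hi.1 hi.2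
    simp only []
    rw [hbridge]
    cases hcond : (PySem.Int.band (a - 2 * i) (b + i - a - 1) == 0) <;>
      cases hi0 : (i == (0:Int)) <;> simp [*]

-- ===== VERDICT (by name: the statement is the Claim_ definition above) =====
theorem adem_relation_spec : Claim_equal_adem_relation := by
  unfold Claim_equal_adem_relation
  intro l _
  unfold Spec_adem_relation
  show adem_relation l = adem_relation_alt l
  simp only [adem_relation, adem_relation_alt]
  rw [terms_eq l, cancel_eq (pvTermsB l)]
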